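-- pv_equiv track=rewrite | github.com/WongQiyu/kattis | Leetcode/anagrams.py | find_longest_distance
-- ===== SOURCE A (Python) =====
-- def find_longest_distance(blocks):
--     n = len(blocks)
--     result = 0
--     for i in range(n):
--         j = i
--         while j > 0 and blocks[j - 1] >= blocks[j]:
--             j -= 1
--         low = j
--         j = i
--         while j < n - 1 and blocks[j + 1] >= blocks[j]:
--             j += 1
--         high = j
--         result = max(result, high - low)
--     return result + 1
-- ===== SOURCE B (Python) =====
-- def _runs(seq):
--     # d[i] = length of the maximal non-increasing run of seq ending at i
--     d = [0] * len(seq)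
--     for i in range(1, len(seq)):
--         d[i] = d[i - 1] + 1 if seq[i - 1] >= seq[i] else 0
--     return d
--
-- def find_longest_distance(blocks):
--     d = _runs(blocks)
--     u = _runs(blocks[::-1])[::-1]
--     return max(map(sum, zip(d, u)), default=0) + 1
-- ===== Notes on version B (the rewrite author's own statement) =====
-- stated objective: faster
-- what changed: Replaced the per-index left/right while-loop scans by two linear precomputed run-length arrays (non-increasing run ending at i, non-decreasing run starting at i) combined per index.
import Mathlib
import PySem

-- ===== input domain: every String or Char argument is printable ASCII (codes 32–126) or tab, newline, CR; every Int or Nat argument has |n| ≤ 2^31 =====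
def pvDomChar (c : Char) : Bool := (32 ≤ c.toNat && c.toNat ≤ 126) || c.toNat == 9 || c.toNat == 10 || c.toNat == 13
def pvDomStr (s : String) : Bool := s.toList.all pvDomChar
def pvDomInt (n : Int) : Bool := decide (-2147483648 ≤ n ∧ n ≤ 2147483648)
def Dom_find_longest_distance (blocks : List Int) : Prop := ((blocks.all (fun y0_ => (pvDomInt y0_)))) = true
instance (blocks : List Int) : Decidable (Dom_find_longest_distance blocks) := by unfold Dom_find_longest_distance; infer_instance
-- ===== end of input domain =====

-- B replaces A's quadratic per-index while-loop scans by two linear run-length passes; same return value.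

-- ===== PORT A =====
-- inner `while j > 0 and blocks[j-1] >= blocks[j]: j -= 1`
def walkLow (blocks : List Int) : Nat → Nat
  | 0 => 0
  | j + 1 => if blocks.getD j 0 ≥ blocks.getD (j + 1) 0 then walkLow blocks j else j + 1

-- inner `while j < n - 1 and blocks[j+1] >= blocks[j]: j += 1`, fuel = (n-1) - j
def walkHigh (blocks : List Int) : Nat → Nat → Nat
  | 0, j => j
  | f + 1, j => if blocks.getD (j + 1) 0 ≥ blocks.getD j 0 then walkHigh blocks f (j + 1) else j

def find_longest_distance (blocks : List Int) : Int :=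
  let n := blocks.length
  let result := (List.range n).foldl
    (fun result i =>
      max result (((walkHigh blocks (n - 1 - i) i : Nat) : Int) - ((walkLow blocks i : Nat) : Int)))
    0
  result + 1

-- ===== PORT B =====
-- _runs: d[i] = d[i-1] + 1 if seq[i-1] >= seq[i] else 0 (d[0] = 0), the recurrence evaluated per index
def runsFrom (seq : List Int) : Nat → Nat
  | 0 => 0
  | i + 1 => if seq.getD i 0 ≥ seq.getD (i + 1) 0 then runsFrom seq i + 1 else 0

def runs (seq : List Int) : List Nat := (List.range seq.length).map (runsFrom seq)

def find_longest_distance_alt (blocks : List Int) : Int :=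
  let d := runs blocks
  let u := (runs blocks.reverse).reverse
  ((((d.zip u).map (fun p => p.1 + p.2)).foldl max 0 : Nat) : Int) + 1

-- ===== PRECONDITION & SPEC =====
def Spec_find_longest_distance (blocks : List Int) (out : Int) : Prop := out = find_longest_distance_alt blocks
instance (blocks : List Int) (out : Int) : Decidable (Spec_find_longest_distance blocks out) := by unfold Spec_find_longest_distance; infer_instance

-- ===== CLAIM (what is proved, stated in full; the proofs are below) =====
def Claim_equal_find_longest_distance : Prop := ∀ (blocks : List Int), Dom_find_longest_distance blocks → Spec_find_longest_distance blocks (find_longest_distance blocks)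

-- ===== LEMMAS AND PROOFS =====

theorem runsFrom_le (blocks : List Int) (i : Nat) : runsFrom blocks i ≤ i := by
  induction i with
  | zero => simp [runsFrom]
  | succ i ih => simp only [runsFrom]; split <;> omega

theorem walkLow_eq (blocks : List Int) (i : Nat) :
    walkLow blocks i = i - runsFrom blocks i := by
  induction i with
  | zero => simp [walkLow, runsFrom]
  | succ i ih =>
    have h := runsFrom_le blocks i
    simp only [walkLow, runsFrom]
    split
    · rw [ih]; omega
    · rfl

theorem walkHigh_eq (blocks : List Int) (f i : Nat) (h : f + i + 1 = blocks.length) :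
    walkHigh blocks f i = i + runsFrom blocks.reverse f := by
  induction f generalizing i with
  | zero => simp [walkHigh, runsFrom]
  | succ f ih =>
    have hrev : ∀ k, k < blocks.length →
        blocks.reverse.getD k 0 = blocks.getD (blocks.length - 1 - k) 0 := by
      intro k hk
      have hk' : k < blocks.reverse.length := by simpa using hk
      rw [List.getD_eq_getElem _ _ hk', List.getD_eq_getElem _ _ (by omega)]
      simp [List.getElem_reverse]
    have h1 : blocks.reverse.getD f 0 = blocks.getD (i + 1) 0 := by
      rw [hrev f (by omega)]; congr 1; omega
    have h2 : blocks.reverse.getD (f + 1) 0 = blocks.getD i 0 := by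
      rw [hrev (f + 1) (by omega)]; congr 1; omega
    simp only [walkHigh, runsFrom, h1, h2]
    split
    · rw [ih (i + 1) (by omega)]; omega
    · omega

theorem reverse_map_range {α : Type} (n : Nat) (f : Nat → α) :
    ((List.range n).map f).reverse = (List.range n).map (fun i => f (n - 1 - i)) := by
  apply List.ext_getElem
  · simp
  · intro i h1 h2
    simp only [List.length_map, List.length_range] at h1 h2
    simp only [List.getElem_reverse, List.length_map, List.length_range,
      List.getElem_map, List.getElem_range]

theorem foldl_max_cast (l : List Nat) (g : Nat → Nat) (a : Nat) :
    ((l.foldl (fun b i => max b (g i)) a : Nat) : Int)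
      = l.foldl (fun b i => max b ((g i : Nat) : Int)) (a : Int) := by
  induction l generalizing a with
  | nil => simp
  | cons x xs ih => simp only [List.foldl_cons, ih, Nat.cast_max]

theorem find_longest_distance_eq (blocks : List Int) :
    find_longest_distance blocks = find_longest_distance_alt blocks := by
  unfold find_longest_distance find_longest_distance_alt
  simp only [runs]
  set n := blocks.length with hn
  -- B's zipped list is a map over range n
  have hu : ((List.range blocks.reverse.length).map (runsFrom blocks.reverse)).reverse
      = (List.range n).map (fun i => runsFrom blocks.reverse (n - 1 - i)) := by
    rw [List.length_reverse, ← hn, reverse_map_range]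
  rw [hu, List.zip_map', List.map_map]
  -- A's fold elementwise equals the cast of B's Nat values
  have hstep : (List.range n).foldl
      (fun result i => max result (((walkHigh blocks (n - 1 - i) i : Nat) : Int)
        - ((walkLow blocks i : Nat) : Int))) 0
    = (List.range n).foldl
      (fun result i => max result (((runsFrom blocks i + runsFrom blocks.reverse (n - 1 - i) : Nat) : Int))) 0 := by
    apply PySem.List.foldl_congr_mem
    intro acc i hi
    have hin : i < n := by simpa using List.mem_range.mp hi
    have hlo := walkLow_eq blocks i
    have hhi := walkHigh_eq blocks (n - 1 - i) i (by omega)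
    have hle := runsFrom_le blocks i
    congr 1
    rw [hlo, hhi]
    push_cast [Nat.sub_sub, Nat.add_sub_cancel' hle]
    omega
  rw [hstep]
  congr 1
  simp only [Function.comp_def, List.foldl_map]
  rw [foldl_max_cast (List.range n) (fun i => runsFrom blocks i + runsFrom blocks.reverse (n - 1 - i)) 0]
  norm_num

-- ===== VERDICT (by name: the statement is the Claim_ definition above) =====
theorem find_longest_distance_spec : Claim_equal_find_longest_distance := by
  intro blocks _
  exact find_longest_distance_eq blocks
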